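-- pv_equiv track=rewrite | github.com/Mavchi/tira-kertaus | 2_Tehokkuus/exercises/onechar.py | count
-- ===== SOURCE A (Python) =====
-- def count(s):
--     count = 0
--     length = 0
--     for i in range(len(s)):
--         length += 1
--         count += length
--         if i < len(s)-1 and s[i]!=s[i+1]:
--             length = 0
--     return count
-- ===== SOURCE B (Python) =====
-- def count(s):
--     # Per-run accumulation: each maximal run of equal characters of length L
--     # contributes the triangular number L*(L+1)//2.
--     total = 0
--     i = 0
--     n = len(s)
--     while i < n:
--         j = i + 1
--         while j < n and s[j] == s[i]:
--             j += 1
--         L = j - i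
--         total += L * (L + 1) // 2
--         i = j
--     return total
-- ===== Notes on version B (the rewrite author's own statement) =====
-- stated objective: alternative
-- what changed: B walks the maximal runs of equal characters and adds the closed-form triangular number L*(L+1)//2 once per run, instead of A's per-character length/count accumulator updates.
import Mathlib
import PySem

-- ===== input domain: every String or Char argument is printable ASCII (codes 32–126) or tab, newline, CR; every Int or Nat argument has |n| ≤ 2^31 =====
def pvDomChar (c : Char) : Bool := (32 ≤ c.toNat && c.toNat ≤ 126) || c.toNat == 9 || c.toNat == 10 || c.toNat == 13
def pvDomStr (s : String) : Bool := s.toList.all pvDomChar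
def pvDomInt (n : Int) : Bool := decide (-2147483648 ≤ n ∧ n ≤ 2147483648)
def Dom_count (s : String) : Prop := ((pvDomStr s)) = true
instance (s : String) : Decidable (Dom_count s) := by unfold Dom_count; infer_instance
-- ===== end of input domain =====

-- B replaces A's per-character length/count accumulators by a walk over maximal runs of
-- equal characters, adding the triangular closed form L*(L+1)//2 per run (alternative, same cost).


-- ===== PORT A =====
def count (s : String) : Int :=
  let n := PySem.Str.len s
  (((PySem.List.pyRange 0 n 1).foldl
      (fun (st : Int × Int) i =>
        let length := st.2 + 1
        let count := st.1 + length
        if i < n - 1 ∧ PySem.Str.pyGet? s i ≠ PySem.Str.pyGet? s (i + 1) then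
          (count, 0)
        else
          (count, length))
      (0, 0))).1

-- ===== PORT B =====
-- outer while: one step per maximal run; inner while 'j += 1 while s[j] == s[i]' = takeWhile/dropWhile on the tail
def sumRuns : List Char → Int
  | [] => 0
  | c :: cs =>
      let L : Int := ((cs.takeWhile (· == c)).length : Int) + 1
      PySem.Int.floordiv (L * (L + 1)) 2 + sumRuns (cs.dropWhile (· == c))
termination_by l => l.length
decreasing_by
  simp only [List.length_cons]
  exact Nat.lt_succ_of_le (List.length_dropWhile_le _ _)

def count_alt (s : String) : Int := sumRuns s.toList

-- ===== PRECONDITION & SPEC =====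
def Spec_count (s : String) (out : Int) : Prop := out = count_alt s
instance (s : String) (out : Int) : Decidable (Spec_count s out) := by unfold Spec_count; infer_instance

-- ===== CLAIM (what is proved, stated in full; the proofs are below) =====
def Claim_equal_count : Prop := ∀ (s : String), Dom_count s → Spec_count s (count s)

-- ===== LEMMAS AND PROOFS =====

-- A's loop body, on the code-point list (definitionally A's fold function)
def stepA (l : List Char) : Int × Int → Int → Int × Int :=
  fun st i =>
    let length := st.2 + 1
    let count := st.1 + length
    if i < (l.length : Int) - 1 ∧ PySem.List.pyGet? l i ≠ PySem.List.pyGet? l (i + 1) then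
      (count, 0)
    else
      (count, length)

def tri (m : Int) : Int := PySem.Int.floordiv (m * (m + 1)) 2

lemma tri_step (m : Int) : tri (m + 1) = tri m + (m + 1) := by
  unfold tri
  rw [PySem.Int.floordiv_eq_ediv_of_pos (by omega), PySem.Int.floordiv_eq_ediv_of_pos (by omega)]
  have h : (m + 1) * (m + 1 + 1) = m * (m + 1) + (m + 1) * 2 := by ring
  rw [h, Int.add_mul_ediv_right _ _ (by omega)]

-- value of A's loop from state (·, len) over a suffix of l
def pad (len : Int) : List Char → Int
  | [] => 0
  | c :: cs =>
      tri (len + 1 + ((cs.takeWhile (· == c)).length : Int)) - tri len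
        + sumRuns (cs.dropWhile (· == c))

lemma sumRuns_cons (c : Char) (cs : List Char) :
    sumRuns (c :: cs) =
      tri (((cs.takeWhile (· == c)).length : Int) + 1) + sumRuns (cs.dropWhile (· == c)) := by
  rw [sumRuns]; rfl

lemma sumRuns_nil : sumRuns [] = 0 := by rw [sumRuns]

lemma pad_zero (l : List Char) : pad 0 l = sumRuns l := by
  cases l with
  | nil => rw [pad, sumRuns]
  | cons c cs =>
      rw [pad, sumRuns_cons]
      have h0 : tri 0 = 0 := by decide
      have h1 : (0 : Int) + 1 + ((cs.takeWhile (· == c)).length : Int)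
          = ((cs.takeWhile (· == c)).length : Int) + 1 := by ring
      rw [h0, h1]; ring

lemma loopA (l : List Char) (j : Nat) (cnt len : Int) (hj : j ≤ l.length) :
    ((PySem.List.pyRange (j : Int) (l.length : Int) 1).foldl (stepA l) (cnt, len)).1
      = cnt + pad len (l.drop j) := by
  induction hd : l.length - j generalizing j cnt len with
  | zero =>
      have hje : j = l.length := by omega
      subst hje
      rw [PySem.List.pyRange_one_eq_nil (by omega), List.foldl_nil, List.drop_length, pad]
      ring
  | succ k ih =>
      have hjl : j < l.length := by omega
      rw [PySem.List.pyRange_one_cons (by exact_mod_cast hjl), List.foldl_cons]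
      have hcast : ((j : Int) + 1) = ((j + 1 : Nat) : Int) := by push_cast; ring
      have hget : PySem.List.pyGet? l (j : Int) = some l[j] := by
        rw [PySem.List.pyGet?_natCast]; exact List.getElem?_eq_getElem hjl
      have hdropj : l.drop j = l[j] :: l.drop (j + 1) := List.drop_eq_getElem_cons hjl
      by_cases hend : j + 1 < l.length
      · -- there is a next character
        have hget1 : PySem.List.pyGet? l ((j : Int) + 1) = some l[j + 1] := by
          rw [hcast, PySem.List.pyGet?_natCast]; exact List.getElem?_eq_getElem hend
        have hdropj1 : l.drop (j + 1) = l[j + 1] :: l.drop (j + 2) :=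
          List.drop_eq_getElem_cons hend
        have hlt : (j : Int) < (l.length : Int) - 1 := by omega
        by_cases hc : l[j] = l[j + 1]
        · -- same character: run continues, length carried
          have hcond : ¬ ((j : Int) < (l.length : Int) - 1
              ∧ PySem.List.pyGet? l (j : Int) ≠ PySem.List.pyGet? l ((j : Int) + 1)) := by
            rw [hget, hget1, hc]; simp
          show ((PySem.List.pyRange ((j : Int) + 1) (l.length : Int) 1).foldl (stepA l)
              (stepA l (cnt, len) (j : Int))).1 = _
          rw [show stepA l (cnt, len) (j : Int) = (cnt + (len + 1), len + 1) by
            simp only [stepA, if_neg hcond]]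
          rw [hcast, ih (j + 1) _ _ (by omega) (by omega)]
          rw [hdropj, hdropj1, pad, pad]
          rw [← hc]
          have htw : List.takeWhile (· == l[j]) (l[j] :: l.drop (j + 2))
              = l[j] :: List.takeWhile (· == l[j]) (l.drop (j + 2)) := by
            rw [List.takeWhile_cons]; simp
          have hdw : List.dropWhile (· == l[j]) (l[j] :: l.drop (j + 2))
              = List.dropWhile (· == l[j]) (l.drop (j + 2)) := by
            rw [List.dropWhile_cons]; simp
          rw [htw, hdw, List.length_cons]
          have harg : len + 1 + 1 + ((List.takeWhile (· == l[j]) (l.drop (j + 2))).length : Int)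
              = len + 1 + (((List.takeWhile (· == l[j]) (l.drop (j + 2))).length + 1 : Nat) : Int) := by
            push_cast; ring
          rw [← harg]
          have ht := tri_step len
          linarith [ht]
        · -- different character: run ends, length reset to 0
          have hcond : ((j : Int) < (l.length : Int) - 1
              ∧ PySem.List.pyGet? l (j : Int) ≠ PySem.List.pyGet? l ((j : Int) + 1)) := by
            refine ⟨hlt, ?_⟩
            rw [hget, hget1]
            simp [hc]
          show ((PySem.List.pyRange ((j : Int) + 1) (l.length : Int) 1).foldl (stepA l)
              (stepA l (cnt, len) (j : Int))).1 = _
          rw [show stepA l (cnt, len) (j : Int) = (cnt + (len + 1), 0) by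
            simp only [stepA, if_pos hcond]]
          rw [hcast, ih (j + 1) _ _ (by omega) (by omega), pad_zero]
          rw [hdropj, pad]
          have hbeq : (l[j + 1] == l[j]) = false := by simp [Ne.symm hc]
          have htw : List.takeWhile (· == l[j]) (l.drop (j + 1)) = [] := by
            rw [hdropj1, List.takeWhile_cons, hbeq]; rfl
          have hdw : List.dropWhile (· == l[j]) (l.drop (j + 1)) = l.drop (j + 1) := by
            rw [hdropj1, List.dropWhile_cons, hbeq]; rfl
          rw [htw, hdw]
          have harg : len + 1 + (([] : List Char).length : Int) = len + 1 := by
            simp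
          rw [harg]
          have ht := tri_step len
          linarith [ht]
      · -- j is the last index: condition false, loop ends after this step
        have hje : j + 1 = l.length := by omega
        have hcond : ¬ ((j : Int) < (l.length : Int) - 1
            ∧ PySem.List.pyGet? l (j : Int) ≠ PySem.List.pyGet? l ((j : Int) + 1)) := by
          intro h; have := h.1; omega
        show ((PySem.List.pyRange ((j : Int) + 1) (l.length : Int) 1).foldl (stepA l)
            (stepA l (cnt, len) (j : Int))).1 = _
        rw [show stepA l (cnt, len) (j : Int) = (cnt + (len + 1), len + 1) by
          simp only [stepA, if_neg hcond]]
        rw [PySem.List.pyRange_one_eq_nil (by omega), List.foldl_nil]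
        have hdrop1 : l.drop (j + 1) = [] := List.drop_eq_nil_of_le (by omega)
        rw [hdropj, hdrop1, pad]
        simp only [List.takeWhile_nil, List.dropWhile_nil, List.length_nil, Nat.cast_zero,
          add_zero, sumRuns_nil]
        have ht := tri_step len
        linarith [ht]

-- ===== VERDICT (by name: the statement is the Claim_ definition above) =====
theorem count_spec : Claim_equal_count := by
  intro s _
  unfold Spec_count count count_alt
  simp only [PySem.Str.len_eq, PySem.Str.pyGet?_eq]
  have h := loopA s.toList 0 0 0 (Nat.zero_le _)
  simp only [Nat.cast_zero, List.drop_zero, pad_zero, zero_add] at h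
  exact h
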